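-- pv_equiv track=rewrite | github.com/utd-ai/Data_Mining_in_Action_2018_Spring | sport/hw0/benchmarks/w2v_baseline_Maksim_Shevchenko/IPoet2.py | wordNumByPositionInScheme
-- ===== SOURCE A (Python) =====
-- def wordNumByPositionInScheme(list,ps):
--     num=-1
--     length=0
--     for word in list:
--         num=num+1
--         length=length+len(word)+1 # +1 for space
--         if length>ps: return num
--
--     return num
-- ===== SOURCE B (Python) =====
-- def wordNumByPositionInScheme(list, ps):
--     # Build the full prefix-sum table of cumulative word lengths (+1 for the
--     # space after each word), then binary-search for the first entry > ps.
--     prefix = []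
--     total = 0
--     for word in list:
--         total += len(word) + 1
--         prefix.append(total)
--     lo, hi = 0, len(prefix)
--     while lo < hi:
--         mid = (lo + hi) // 2
--         if ps < prefix[mid]:
--             hi = mid
--         else:
--             lo = mid + 1
--     if lo == len(prefix):
--         return len(list) - 1
--     return lo
-- ===== Notes on version B (the rewrite author's own statement) =====
-- stated objective: alternative
-- what changed: A's single early-exit linear scan with running count/length is replaced by building the full prefix-sum table of cumulative word lengths and then binary-searching (bisect_right style) for the first entry exceeding ps, mapping the not-found case to len(list)-1.
import Mathlib
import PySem

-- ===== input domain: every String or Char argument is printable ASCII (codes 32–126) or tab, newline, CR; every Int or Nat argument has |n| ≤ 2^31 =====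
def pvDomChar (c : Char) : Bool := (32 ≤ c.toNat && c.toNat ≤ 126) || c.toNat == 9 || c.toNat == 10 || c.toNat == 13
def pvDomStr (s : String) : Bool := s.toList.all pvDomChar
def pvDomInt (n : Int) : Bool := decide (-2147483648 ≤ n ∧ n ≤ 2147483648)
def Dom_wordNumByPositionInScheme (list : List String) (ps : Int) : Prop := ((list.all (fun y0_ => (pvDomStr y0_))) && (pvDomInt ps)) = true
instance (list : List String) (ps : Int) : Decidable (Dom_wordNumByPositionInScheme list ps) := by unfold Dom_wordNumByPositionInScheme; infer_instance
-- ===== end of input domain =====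

-- B replaces A's early-exit linear scan by a prefix-sum table plus binary search (alternative decomposition, same result).

-- ===== PORT A =====
-- the for-loop of A with its running num/length state, early return on length > ps
def pvScanA : List String → Int → Int → Int → Int
  | [], _, num, _ => num
  | w :: ws, ps, num, length =>
      let num' := num + 1
      let length' := length + PySem.Str.len w + 1
      if length' > ps then num' else pvScanA ws ps num' length'

def wordNumByPositionInScheme (list : List String) (ps : Int) : Int :=
  pvScanA list ps (-1) 0

-- ===== PORT B =====
-- first loop of B: build the prefix-sum table (total, prefix.append(total))
def pvPrefix : List String → Int → List Int → List Int
  | [], _, pref => pref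
  | w :: ws, total, pref =>
      let total' := total + PySem.Str.len w + 1
      pvPrefix ws total' (pref ++ [total'])

-- while-loop of B: binary search; a.getD mid 0 is exact for Python's a[mid]
-- since lo ≤ mid < hi ≤ len(a) inside the loop
def pvBis (a : List Int) (x : Int) (lo hi : Nat) : Nat :=
  if lo < hi then
    let mid := (lo + hi) / 2
    if x < a.getD mid 0 then pvBis a x lo mid else pvBis a x (mid + 1) hi
  else lo
termination_by hi - lo
decreasing_by all_goals omega

def wordNumByPositionInScheme_alt (list : List String) (ps : Int) : Int :=
  let pref := pvPrefix list 0 []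
  let lo := pvBis pref ps 0 pref.length
  if lo = pref.length then (list.length : Int) - 1 else (lo : Int)

-- ===== PRECONDITION & SPEC =====
def Spec_wordNumByPositionInScheme (list : List String) (ps : Int) (out : Int) : Prop := out = wordNumByPositionInScheme_alt list ps
instance (list : List String) (ps : Int) (out : Int) : Decidable (Spec_wordNumByPositionInScheme list ps out) := by unfold Spec_wordNumByPositionInScheme; infer_instance

-- ===== CLAIM (what is proved, stated in full; the proofs are below) =====
def Claim_equal_wordNumByPositionInScheme : Prop := ∀ (list : List String) (ps : Int), Dom_wordNumByPositionInScheme list ps → Spec_wordNumByPositionInScheme list ps (wordNumByPositionInScheme list ps)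

-- ===== LEMMAS AND PROOFS =====

-- proof-side prefix-sum table (no accumulator list)
def pvAcc (t : Int) : List String → List Int
  | [] => []
  | w :: ws => (t + PySem.Str.len w + 1) :: pvAcc (t + PySem.Str.len w + 1) ws

-- index of the first entry > x (linear characterization)
def pvLin (x : Int) : List Int → Nat
  | [] => 0
  | y :: ys => if x < y then 0 else pvLin x ys + 1

theorem pvPrefix_eq_acc (ws : List String) : ∀ (t : Int) (p : List Int),
    pvPrefix ws t p = p ++ pvAcc t ws := by
  induction ws with
  | nil => intro t p; simp [pvPrefix, pvAcc]
  | cons w ws ih => intro t p; simp only [pvPrefix, pvAcc, ih]; simp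

theorem pvAcc_length (ws : List String) : ∀ t, (pvAcc t ws).length = ws.length := by
  induction ws with
  | nil => intro t; simp [pvAcc]
  | cons w ws ih => intro t; simp [pvAcc, ih]

theorem pvAcc_mem_le (ws : List String) : ∀ (t : Int) (y : Int), y ∈ pvAcc t ws → t ≤ y := by
  induction ws with
  | nil => intro t y h; simp [pvAcc] at h
  | cons w ws ih =>
      intro t y h
      have hf : (0 : Int) ≤ PySem.Str.len w + 1 := by
        have := PySem.Str.len_eq w; omega
      rw [pvAcc, List.mem_cons] at h
      rcases h with h | h
      · omega
      · have := ih (t + PySem.Str.len w + 1) y h; omega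

theorem pvAcc_sorted (ws : List String) : ∀ t, (pvAcc t ws).Pairwise (· ≤ ·) := by
  induction ws with
  | nil => intro t; simp [pvAcc]
  | cons w ws ih =>
      intro t
      rw [pvAcc, List.pairwise_cons]
      exact ⟨fun y hy => pvAcc_mem_le ws _ y hy, ih _⟩

theorem pvScanA_eq_lin (ps : Int) (ws : List String) : ∀ (num length : Int),
    pvScanA ws ps num length =
      if pvLin ps (pvAcc length ws) = ws.length then num + ws.length
      else num + (pvLin ps (pvAcc length ws) + 1 : Nat) := by
  induction ws with
  | nil => intro num length; simp [pvScanA, pvAcc, pvLin]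
  | cons w ws ih =>
      intro num length
      rw [pvScanA, pvAcc, pvLin]
      by_cases h : ps < length + PySem.Str.len w + 1
      · rw [if_pos h, if_pos h]
        have h0 : ¬ ((0 : Nat) = ws.length + 1) := by omega
        simp only [List.length_cons, h0, if_false]
        push_cast
        ring
      · rw [if_neg h, if_neg h, ih]
        by_cases hk : pvLin ps (pvAcc (length + PySem.Str.len w + 1) ws) = ws.length
        · have : pvLin ps (pvAcc (length + PySem.Str.len w + 1) ws) + 1 = ws.length + 1 := by omega
          simp only [hk, if_pos rfl, List.length_cons, this, if_pos rfl]
          push_cast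
          ring
        · have : ¬ (pvLin ps (pvAcc (length + PySem.Str.len w + 1) ws) + 1 = ws.length + 1) := by omega
          simp only [hk, if_neg hk, List.length_cons, this, if_neg this]
          push_cast
          ring

-- pvLin's characterizing properties
theorem pvLin_le (x : Int) (a : List Int) : pvLin x a ≤ a.length := by
  induction a with
  | nil => simp [pvLin]
  | cons y ys ih =>
      rw [pvLin]
      split
      · simp
      · simp only [List.length_cons]; omega

theorem pvLin_lt (x : Int) (a : List Int) : ∀ j, j < pvLin x a → a.getD j 0 ≤ x := by
  induction a with
  | nil => simp [pvLin]
  | cons y ys ih =>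
      intro j hj
      rw [pvLin] at hj
      split at hj
      · omega
      · rename_i hxy
        cases j with
        | zero => simpa using by omega
        | succ j' => simpa using ih j' (by omega)

theorem pvLin_ge (x : Int) (a : List Int) (hs : a.Pairwise (· ≤ ·)) :
    ∀ j, pvLin x a ≤ j → j < a.length → x < a.getD j 0 := by
  induction a with
  | nil => simp
  | cons y ys ih =>
      intro j hj hlen
      rw [List.pairwise_cons] at hs
      rw [pvLin] at hj
      split at hj
      · rename_i hxy
        cases j with
        | zero => simpa using hxy
        | succ j' =>
            have hjl : j' < ys.length := by simpa using hlen
            have hm : ys.getD j' 0 ∈ ys := by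
              rw [List.getD_eq_getElem ys 0 hjl]
              exact List.getElem_mem hjl
            have := hs.1 _ hm
            simpa using lt_of_lt_of_le hxy this
      · cases j with
        | zero => omega
        | succ j' => simpa using ih hs.2 j' (by omega) (by simpa using hlen)

theorem pvBis_eq_lin (a : List Int) (x : Int) (hs : a.Pairwise (· ≤ ·)) :
    ∀ lo hi, lo ≤ hi → hi ≤ a.length →
      (∀ j, j < lo → a.getD j 0 ≤ x) →
      (∀ j, hi ≤ j → j < a.length → x < a.getD j 0) →
      pvBis a x lo hi = pvLin x a := by
  have sortedD : ∀ i j, i ≤ j → j < a.length → a.getD i 0 ≤ a.getD j 0 := by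
    intro i j hij hj
    rcases Nat.eq_or_lt_of_le hij with rfl | hlt
    · exact le_refl _
    · rw [List.getD_eq_getElem a 0 (by omega), List.getD_eq_getElem a 0 hj]
      exact List.pairwise_iff_getElem.mp hs i j (by omega) hj hlt
  suffices H : ∀ n lo hi, hi - lo ≤ n → lo ≤ hi → hi ≤ a.length →
      (∀ j, j < lo → a.getD j 0 ≤ x) →
      (∀ j, hi ≤ j → j < a.length → x < a.getD j 0) →
      pvBis a x lo hi = pvLin x a by
    exact fun lo hi => H (hi - lo) lo hi (le_refl _)
  intro n
  induction n with
  | zero =>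
      intro lo hi hfuel hle hhi hlo hhiInv
      have heq : lo = hi := by omega
      subst heq
      rw [pvBis, if_neg (by omega)]
      by_cases hcmp : pvLin x a < lo
      · have h1 := pvLin_ge x a hs (pvLin x a) (le_refl _) (by omega)
        have h2 := hlo _ hcmp
        omega
      · by_cases hcmp2 : lo < pvLin x a
        · have h1 := pvLin_lt x a lo hcmp2
          have h2 := hhiInv lo (le_refl _) (by have := pvLin_le x a; omega)
          omega
        · omega
  | succ n ih =>
      intro lo hi hfuel hle hhi hlo hhiInv
      by_cases hlt : lo < hi
      · rw [pvBis, if_pos hlt]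
        by_cases hx : x < a.getD ((lo + hi) / 2) 0
        · simp only [if_pos hx]
          exact ih lo ((lo + hi) / 2) (by omega) (by omega) (by omega) hlo
            (fun j hj hjl => lt_of_lt_of_le hx (sortedD _ _ hj hjl))
        · simp only [if_neg hx]
          refine ih ((lo + hi) / 2 + 1) hi (by omega) (by omega) hhi ?_ hhiInv
          intro j hj
          have hmle : a.getD j 0 ≤ a.getD ((lo + hi) / 2) 0 :=
            sortedD j ((lo + hi) / 2) (by omega) (by omega)
          omega
      · have heq : lo = hi := by omega
        subst heq
        rw [pvBis, if_neg (by omega)]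
        by_cases hcmp : pvLin x a < lo
        · have h1 := pvLin_ge x a hs (pvLin x a) (le_refl _) (by omega)
          have h2 := hlo _ hcmp
          omega
        · by_cases hcmp2 : lo < pvLin x a
          · have h1 := pvLin_lt x a lo hcmp2
            have h2 := hhiInv lo (le_refl _) (by have := pvLin_le x a; omega)
            omega
          · omega

-- ===== VERDICT (by name: the statement is the Claim_ definition above) =====
theorem wordNumByPositionInScheme_spec : Claim_equal_wordNumByPositionInScheme := by
  intro list ps _
  unfold Spec_wordNumByPositionInScheme
  unfold wordNumByPositionInScheme wordNumByPositionInScheme_alt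
  rw [pvPrefix_eq_acc, List.nil_append]
  show pvScanA list ps (-1) 0 =
    (if pvBis (pvAcc 0 list) ps 0 (pvAcc 0 list).length = (pvAcc 0 list).length
     then (list.length : Int) - 1
     else ((pvBis (pvAcc 0 list) ps 0 (pvAcc 0 list).length : Nat) : Int))
  rw [pvBis_eq_lin (pvAcc 0 list) ps (pvAcc_sorted list 0) 0 (pvAcc 0 list).length
      (by omega) (le_refl _) (fun j hj => absurd hj (by omega))
      (fun j hj hjl => absurd hjl (by omega))]
  rw [pvScanA_eq_lin, pvAcc_length]
  by_cases hk : pvLin ps (pvAcc 0 list) = list.length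
  · simp only [hk, if_pos rfl]
    push_cast
    ring
  · simp only [if_neg hk]
    push_cast
    ring
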